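-- pv_equiv track=rewrite | github.com/981377660LMT/algorithm-study | 21_位运算/按位或/3344. 最大尺寸数组.py | maxSizedArray
-- ===== SOURCE A (Python) =====
-- def calc(upper: int, k: int) -> int:
--     """[0, upper]中二进制第k(k>=0)位为1的数的个数.
--     即满足 `num & (1 << k) > 0` 的数的个数
--     """
--     if k >= upper.bit_length():
--         return 0
--     res = upper // (1 << (k + 1)) * (1 << k)
--     upper %= 1 << (k + 1)
--     if upper >= 1 << k:
--         res += upper - (1 << k) + 1
--     return res
--
-- def maxSizedArray(s: int) -> int:
--     def check(mid: int) -> bool: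
--         pairs = mid * mid
--         sumOr = 0
--         # 对于每一位 bit，计算在所有 (j OR k) 中该位为 1 的总次数
--         b = 0
--         while True:
--             ones = calc(mid - 1, b)
--             if ones == 0:
--                 break
--             zeros = mid - ones
--             anyOnes = pairs - zeros * zeros
--             sumOr += anyOnes * (1 << b)
--             b += 1
--         sumI = mid * (mid - 1) // 2
--         return sumI * sumOr <= s
--
--     left, right = 1, int(1e16)
--     while left <= right:
--         mid = (left + right) // 2
--         if check(mid):
--             left = mid + 1
--         else:
--             right = mid - 1
--     return right
-- ===== SOURCE B (Python) =====
-- def _cost(mid: int) -> int: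
--     # total weight sum_{pairs} OR * sum of indices, computed bit by bit over [0, mid)
--     total = 0
--     for b in range((mid - 1).bit_length()):
--         half = 1 << b
--         full = half * 2
--         ones = mid // full * half
--         rem = mid % full
--         if rem > half:
--             ones += rem - half
--         total += (mid * mid - (mid - ones) * (mid - ones)) * half
--     return total * (mid * (mid - 1) // 2)
--
--
-- def maxSizedArray(s: int) -> int:
--     ans = 0
--     mid = 1
--     while mid <= 10**16 and _cost(mid) <= s:
--         ans = mid
--         mid += 1
--     return ans
-- ===== Notes on version B (the rewrite author's own statement) =====
-- stated objective: simpler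
-- what changed: Replaced A's binary search over the capped range by a linear scan that tries candidate sizes in increasing order and stops at the first size whose total weight exceeds s; the per-bit weight sum uses a bounded for-loop over bit_length with a direct count-below-mid formula instead of A's calc(mid-1, k) inside a while-True/break loop.
import Mathlib
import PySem

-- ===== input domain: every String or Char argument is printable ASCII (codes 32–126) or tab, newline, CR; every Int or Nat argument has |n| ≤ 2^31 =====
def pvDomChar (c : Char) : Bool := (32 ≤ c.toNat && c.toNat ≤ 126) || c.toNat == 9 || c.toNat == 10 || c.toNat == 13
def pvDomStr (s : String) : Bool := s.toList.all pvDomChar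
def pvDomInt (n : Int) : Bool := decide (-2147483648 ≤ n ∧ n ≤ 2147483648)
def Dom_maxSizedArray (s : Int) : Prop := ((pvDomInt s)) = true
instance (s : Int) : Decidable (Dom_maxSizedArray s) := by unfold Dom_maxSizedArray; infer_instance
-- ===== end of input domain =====

-- B replaces A's binary search over the capped range by a linear scan that stops at the
-- first size whose total weight exceeds s (objective: a simpler outer loop; it never
-- evaluates the weight of huge candidate sizes).

-- ===== PORT A =====
-- calc(upper, k): count of numbers in [0, upper] whose bit k is set.
-- (k is A's inner-loop counter, always ≥ 0, so it is carried as a Nat; `1 << k` is `1 <<< k`.)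
def pvCalcA (upper : Int) (k : Nat) : Int :=
  if (PySem.Int.bitLength upper : Int) ≤ (k : Int) then 0
  else
    let res := PySem.Int.floordiv upper ((1 : Int) <<< (k + 1)) * ((1 : Int) <<< k)
    let upper' := PySem.Int.mod upper ((1 : Int) <<< (k + 1))
    if (1 : Int) <<< k ≤ upper' then res + (upper' - (1 : Int) <<< k + 1) else res

-- needed by pvCheckLoopA's termination proof (cited in decreasing_by)
theorem pvCalcA_ne_zero_lt (upper : Int) (k : Nat) (h : pvCalcA upper k ≠ 0) :
    k < PySem.Int.bitLength upper := by
  by_contra hk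
  exact h (by simp [pvCalcA, Int.ofNat_le.mpr (Nat.le_of_not_lt hk)])

-- A's inner `while True` loop: b counts up, breaks at the first b with ones == 0
def pvCheckLoopA (mid : Int) (b : Nat) (sumOr : Int) : Int :=
  let ones := pvCalcA (mid - 1) b
  if h : ones = 0 then sumOr
  else
    pvCheckLoopA mid (b + 1)
      (sumOr + (mid * mid - (mid - ones) * (mid - ones)) * ((1 : Int) <<< b))
termination_by PySem.Int.bitLength (mid - 1) - b
decreasing_by
  have := pvCalcA_ne_zero_lt (mid - 1) b h
  omega

def pvCheckA (s mid : Int) : Bool :=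
  let sumOr := pvCheckLoopA mid 0 0
  let sumI := PySem.Int.floordiv (mid * (mid - 1)) 2
  decide (sumI * sumOr ≤ s)

-- the binary-search loop: while left <= right
def pvBsLoopA (s left right : Int) : Int :=
  if h : left ≤ right then
    let mid := PySem.Int.floordiv (left + right) 2
    if pvCheckA s mid then pvBsLoopA s (mid + 1) right
    else pvBsLoopA s left (mid - 1)
  else right
termination_by (right + 1 - left).toNat
decreasing_by
  · have := PySem.Int.floordiv_two_mid_bounds h
    omega
  · have := PySem.Int.floordiv_two_mid_bounds h
    omega

def maxSizedArray (s : Int) : Int := pvBsLoopA s 1 10000000000000000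

-- ===== PORT B =====
-- _cost(mid): total weight of an array of size mid, summed bit by bit over [0, mid)
def pvCostB (mid : Int) : Int :=
  let total :=
    (List.range (PySem.Int.bitLength (mid - 1))).foldl
      (fun (total : Int) (b : Nat) =>
        let half : Int := (1 : Int) <<< b
        let full := half * 2
        let ones := PySem.Int.floordiv mid full * half
        let rem := PySem.Int.mod mid full
        let ones := if half < rem then ones + (rem - half) else ones
        total + (mid * mid - (mid - ones) * (mid - ones)) * half) 0
  total * PySem.Int.floordiv (mid * (mid - 1)) 2

-- the linear scan: while mid <= 10**16 and _cost(mid) <= s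
def pvScanLoopB (s ans mid : Int) : Int :=
  if h : mid ≤ 10000000000000000 ∧ pvCostB mid ≤ s then pvScanLoopB s mid (mid + 1)
  else ans
termination_by (10000000000000000 + 1 - mid).toNat
decreasing_by omega

def maxSizedArray_alt (s : Int) : Int := pvScanLoopB s 0 1

-- ===== PRECONDITION & SPEC =====
def Spec_maxSizedArray (s : Int) (out : Int) : Prop := out = maxSizedArray_alt s
instance (s : Int) (out : Int) : Decidable (Spec_maxSizedArray s out) := by unfold Spec_maxSizedArray; infer_instance

-- ===== CLAIM (what is proved, stated in full; the proofs are below) =====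
def Claim_equal_maxSizedArray : Prop := ∀ (s : Int), Dom_maxSizedArray s → Spec_maxSizedArray s (maxSizedArray s)

-- ===== LEMMAS AND PROOFS =====

-- mathematical form of the per-bit count of numbers in [0, m) with bit b set
def pvOnes (m : Int) (b : Nat) : Int :=
  m / 2 ^ (b + 1) * 2 ^ b + (if 2 ^ b < m % 2 ^ (b + 1) then m % 2 ^ (b + 1) - 2 ^ b else 0)

-- per-bit summand shared by both programs' inner loops
def pvTerm (m : Int) (b : Nat) : Int :=
  (m * m - (m - pvOnes m b) * (m - pvOnes m b)) * 2 ^ b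

-- the common value of A's sumOr and B's total
def pvS (m : Int) : Int :=
  ∑ b ∈ Finset.range (PySem.Int.bitLength (m - 1)), pvTerm m b

-- the common value of sumI
def pvT (m : Int) : Int := m * (m - 1) / 2

theorem pvLt_pow_of_ge_bitLength (u : Int) (hu : 0 ≤ u) (b : Nat)
    (hb : PySem.Int.bitLength u ≤ b) : u < 2 ^ b := by
  have h1 : u.natAbs < 2 ^ PySem.Int.bitLength u := PySem.Int.lt_two_pow_bitLength u
  have h2 : (2:Nat) ^ PySem.Int.bitLength u ≤ 2 ^ b := Nat.pow_le_pow_right (by omega) hb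
  have h3 : u.natAbs < 2 ^ b := lt_of_lt_of_le h1 h2
  have h4 : (u.natAbs : Int) = u := Int.natAbs_of_nonneg hu
  calc u = (u.natAbs : Int) := h4.symm
    _ < ((2 ^ b : Nat) : Int) := by exact_mod_cast h3
    _ = 2 ^ b := by push_cast; ring

theorem pvPow_le_of_lt_bitLength (u : Int) (b : Nat)
    (hb : b < PySem.Int.bitLength u) : 2 ^ b ≤ u.natAbs := by
  have hu0 : u ≠ 0 := by
    intro h; rw [h] at hb; simp [PySem.Int.bitLength_zero] at hb
  have h1 := PySem.Int.two_pow_bitLength_le u hu0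
  have h2 : (2:Nat) ^ b ≤ 2 ^ (PySem.Int.bitLength u - 1) := Nat.pow_le_pow_right (by omega) (by omega)
  omega

theorem pvOnes_nonneg (m : Int) (hm : 0 ≤ m) (b : Nat) : 0 ≤ pvOnes m b := by
  unfold pvOnes
  have hQ : (0:Int) < 2 ^ (b + 1) := by positivity
  have hq : 0 ≤ m / 2 ^ (b + 1) := Int.ediv_nonneg hm (le_of_lt hQ)
  have hP : (0:Int) < 2 ^ b := by positivity
  split_ifs with h
  · nlinarith
  · nlinarith

theorem pvOnes_le (m : Int) (hm : 0 ≤ m) (b : Nat) : pvOnes m b ≤ m := by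
  unfold pvOnes
  have hQ : (0:Int) < 2 ^ (b + 1) := by positivity
  have hP : (0:Int) < 2 ^ b := by positivity
  have hPQ : (2:Int) ^ (b + 1) = 2 ^ b * 2 := by rw [pow_succ]
  have hqr := Int.ediv_add_emod m (2 ^ (b + 1))
  have h0r := Int.emod_nonneg m (ne_of_gt hQ)
  have hq : 0 ≤ m / 2 ^ (b + 1) := Int.ediv_nonneg hm (le_of_lt hQ)
  split_ifs with h
  · nlinarith
  · nlinarith

theorem pvOnes_mono (m : Int) (hm : 0 ≤ m) (b : Nat) : pvOnes m b ≤ pvOnes (m + 1) b := by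
  have hQ : (0:Int) < 2 ^ (b + 1) := by positivity
  have hP : (0:Int) < 2 ^ b := by positivity
  have hPQ : (2:Int) ^ (b + 1) = 2 ^ b * 2 := by rw [pow_succ]
  have hqr := Int.ediv_add_emod m (2 ^ (b + 1))
  have h0r := Int.emod_nonneg m (ne_of_gt hQ)
  have hrQ := Int.emod_lt_of_pos m hQ
  have hq : 0 ≤ m / 2 ^ (b + 1) := Int.ediv_nonneg hm (le_of_lt hQ)
  by_cases hcase : m % 2 ^ (b + 1) + 1 < 2 ^ (b + 1)
  · have huniq : (m + 1) / 2 ^ (b + 1) = m / 2 ^ (b + 1) ∧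
        (m + 1) % 2 ^ (b + 1) = m % 2 ^ (b + 1) + 1 :=
      (Int.ediv_emod_unique hQ).mpr ⟨by linarith, by linarith, hcase⟩
    unfold pvOnes
    rw [huniq.1, huniq.2]
    split_ifs with h1 h2 <;> omega
  · have hr : m % 2 ^ (b + 1) = 2 ^ (b + 1) - 1 := by omega
    have huniq : (m + 1) / 2 ^ (b + 1) = m / 2 ^ (b + 1) + 1 ∧
        (m + 1) % 2 ^ (b + 1) = 0 :=
      (Int.ediv_emod_unique hQ).mpr ⟨by linarith, by omega, hQ⟩
    unfold pvOnes
    rw [huniq.1, huniq.2, hr]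
    split_ifs with h1 h2 <;> nlinarith

theorem pvOnes_eq_zero (m : Int) (hm : 1 ≤ m) (b : Nat)
    (hb : PySem.Int.bitLength (m - 1) ≤ b) : pvOnes m b = 0 := by
  have hmP : m ≤ 2 ^ b := by
    have := pvLt_pow_of_ge_bitLength (m - 1) (by omega) b hb
    omega
  have hP : (0:Int) < 2 ^ b := by positivity
  have hPQ : (2:Int) ^ (b + 1) = 2 ^ b * 2 := by rw [pow_succ]
  have hq : m / 2 ^ (b + 1) = 0 := Int.ediv_eq_zero_of_lt (by omega) (by nlinarith)
  have hr : m % 2 ^ (b + 1) = m := Int.emod_eq_of_lt (by omega) (by nlinarith)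
  unfold pvOnes
  rw [hq, hr, if_neg (by omega)]
  ring

theorem pvOnes_pos (m : Int) (hm : 1 ≤ m) (b : Nat)
    (hb : b < PySem.Int.bitLength (m - 1)) : 0 < pvOnes m b := by
  have hPm : 2 ^ b ≤ m - 1 := by
    have h1 := pvPow_le_of_lt_bitLength (m - 1) b hb
    have h4 : ((m - 1).natAbs : Int) = m - 1 := Int.natAbs_of_nonneg (by omega)
    calc (2:Int) ^ b = ((2 ^ b : Nat) : Int) := by push_cast; ring
      _ ≤ ((m - 1).natAbs : Int) := by exact_mod_cast h1
      _ = m - 1 := h4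
  have hP : (0:Int) < 2 ^ b := by positivity
  have hPQ : (2:Int) ^ (b + 1) = 2 ^ b * 2 := by rw [pow_succ]
  have hQ : (0:Int) < 2 ^ (b + 1) := by positivity
  have hqr := Int.mul_ediv_add_emod m (2 ^ (b + 1))
  have h0r := Int.emod_nonneg m (ne_of_gt hQ)
  have hq : 0 ≤ m / 2 ^ (b + 1) := Int.ediv_nonneg (by omega) (le_of_lt hQ)
  unfold pvOnes
  split_ifs with h
  · nlinarith
  · have hq1 : 1 ≤ m / 2 ^ (b + 1) := by nlinarith
    nlinarith

theorem pvCalcA_eq (m : Int) (hm : 1 ≤ m) (b : Nat) : pvCalcA (m - 1) b = pvOnes m b := by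
  have hP : (0:Int) < 2 ^ b := by positivity
  have hPQ : (2:Int) ^ (b + 1) = 2 ^ b * 2 := by rw [pow_succ]
  have hQ : (0:Int) < 2 ^ (b + 1) := by positivity
  by_cases hb : PySem.Int.bitLength (m - 1) ≤ b
  · rw [show pvCalcA (m - 1) b = 0 from by
      simp [pvCalcA, Int.ofNat_le.mpr hb], pvOnes_eq_zero m hm b hb]
  · push_neg at hb
    have hsh1 : (1:Int) <<< (b + 1) = 2 ^ (b + 1) := by simp [Int.shiftLeft_eq]
    have hsh : (1:Int) <<< b = 2 ^ b := by simp [Int.shiftLeft_eq]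
    unfold pvCalcA
    rw [if_neg (by push_cast; omega : ¬ (PySem.Int.bitLength (m-1) : Int) ≤ (b:Int))]
    simp only [hsh1, hsh, PySem.Int.floordiv_eq_ediv_of_pos hQ, PySem.Int.mod_eq_emod_of_pos hQ]
    have hqr := Int.mul_ediv_add_emod m (2 ^ (b + 1))
    have h0r := Int.emod_nonneg m (ne_of_gt hQ)
    have hrQ := Int.emod_lt_of_pos m hQ
    by_cases hr : m % 2 ^ (b + 1) = 0
    · have huniq : (m - 1) / 2 ^ (b + 1) = m / 2 ^ (b + 1) - 1 ∧
          (m - 1) % 2 ^ (b + 1) = 2 ^ (b + 1) - 1 :=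
        (Int.ediv_emod_unique hQ).mpr ⟨by rw [mul_sub, mul_one]; omega, by omega, by omega⟩
      rw [huniq.1, huniq.2]
      unfold pvOnes
      rw [if_pos (by omega), if_neg (by omega)]
      ring
    · have huniq : (m - 1) / 2 ^ (b + 1) = m / 2 ^ (b + 1) ∧
          (m - 1) % 2 ^ (b + 1) = m % 2 ^ (b + 1) - 1 :=
        (Int.ediv_emod_unique hQ).mpr ⟨by omega, by omega, by omega⟩
      rw [huniq.1, huniq.2]
      unfold pvOnes
      by_cases hc : 2 ^ b < m % 2 ^ (b + 1)
      · rw [if_pos (by omega), if_pos hc]; ring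
      · rw [if_neg (by omega), if_neg hc]; ring

theorem pvCheckLoopA_eq (m : Int) (hm : 1 ≤ m) :
    ∀ (n : Nat) (b : Nat) (acc : Int), PySem.Int.bitLength (m - 1) - b = n →
      pvCheckLoopA m b acc = acc + ∑ x ∈ Finset.Ico b (PySem.Int.bitLength (m - 1)), pvTerm m x := by
  intro n
  induction n with
  | zero =>
    intro b acc hn
    have hb : PySem.Int.bitLength (m - 1) ≤ b := by omega
    rw [pvCheckLoopA, dif_pos (by rw [pvCalcA_eq m hm b, pvOnes_eq_zero m hm b hb]),
      Finset.Ico_eq_empty (by omega), Finset.sum_empty, add_zero]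
  | succ k ih =>
    intro b acc hn
    have hb : b < PySem.Int.bitLength (m - 1) := by omega
    have hne : pvCalcA (m - 1) b ≠ 0 := by
      rw [pvCalcA_eq m hm b]; exact ne_of_gt (pvOnes_pos m hm b hb)
    rw [pvCheckLoopA, dif_neg hne, ih (b + 1) _ (by omega),
      Finset.sum_eq_sum_Ico_succ_bot hb]
    rw [pvCalcA_eq m hm b]
    have hsh : (1:Int) <<< b = 2 ^ b := by simp [Int.shiftLeft_eq]
    rw [hsh]
    unfold pvTerm
    ring

theorem pvCostB_eq (m : Int) (hm : 1 ≤ m) : pvCostB m = pvS m * pvT m := by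
  unfold pvCostB pvS pvT
  rw [show (fun (total : Int) (b : Nat) =>
        let half : Int := (1 : Int) <<< b
        let full := half * 2
        let ones := PySem.Int.floordiv m full * half
        let rem := PySem.Int.mod m full
        let ones := if half < rem then ones + (rem - half) else ones
        total + (m * m - (m - ones) * (m - ones)) * half) =
        (fun (total : Int) (b : Nat) => total + pvTerm m b) from by
      funext total b
      have hsh : (1:Int) <<< b = 2 ^ b := by simp [Int.shiftLeft_eq]
      have hQ : (0:Int) < 2 ^ (b + 1) := by positivity
      have hPQ : (2:Int) ^ b * 2 = 2 ^ (b + 1) := by rw [pow_succ]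
      simp only [hsh, hPQ, PySem.Int.floordiv_eq_ediv_of_pos hQ, PySem.Int.mod_eq_emod_of_pos hQ]
      unfold pvTerm pvOnes
      split_ifs with h
      · ring
      · ring]
  rw [PySem.List.foldl_add (List.range (PySem.Int.bitLength (m - 1))) (pvTerm m) 0, zero_add,
    PySem.Int.floordiv_eq_ediv_of_pos (by norm_num : (0:Int) < 2)]
  exact rfl

theorem pvCheckA_iff (s m : Int) (hm : 1 ≤ m) : pvCheckA s m = true ↔ pvCostB m ≤ s := by
  unfold pvCheckA
  rw [pvCheckLoopA_eq m hm _ 0 0 rfl, pvCostB_eq m hm]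
  simp only [decide_eq_true_iff]
  rw [PySem.Int.floordiv_eq_ediv_of_pos (by norm_num : (0:Int) < 2), zero_add,
    show ∑ x ∈ Finset.Ico 0 (PySem.Int.bitLength (m - 1)), pvTerm m x = pvS m from by
      unfold pvS; rw [Finset.range_eq_Ico],
    mul_comm]
  unfold pvT
  exact Iff.rfl

theorem pvBitLength_mono (u v : Int) (hu : 0 ≤ u) (huv : u ≤ v) :
    PySem.Int.bitLength u ≤ PySem.Int.bitLength v := by
  by_contra hlt
  push_neg at hlt
  have hu0 : u ≠ 0 := by
    intro h
    rw [h] at hlt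
    simp [PySem.Int.bitLength_zero] at hlt
  have h1 := PySem.Int.two_pow_bitLength_le u hu0
  have h2 := PySem.Int.lt_two_pow_bitLength v
  have h3 : (2:Nat) ^ PySem.Int.bitLength v ≤ 2 ^ (PySem.Int.bitLength u - 1) :=
    Nat.pow_le_pow_right (by omega) (by omega)
  omega

theorem pvTerm_nonneg (m : Int) (hm : 0 ≤ m) (b : Nat) : 0 ≤ pvTerm m b := by
  unfold pvTerm
  have h1 := pvOnes_nonneg m hm b
  have h2 := pvOnes_le m hm b
  have hP : (0:Int) ≤ 2 ^ b := by positivity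
  have : (0:Int) ≤ m * m - (m - pvOnes m b) * (m - pvOnes m b) := by nlinarith
  exact mul_nonneg this hP

theorem pvTerm_mono (m : Int) (hm : 1 ≤ m) (b : Nat) : pvTerm m b ≤ pvTerm (m + 1) b := by
  unfold pvTerm
  have h1 := pvOnes_nonneg m (by omega) b
  have h2 := pvOnes_le m (by omega) b
  have h3 := pvOnes_mono m (by omega) b
  have h4 := pvOnes_le (m + 1) (by omega) b
  have hP : (0:Int) ≤ 2 ^ b := by positivity
  apply mul_le_mul_of_nonneg_right _ hP
  nlinarith [mul_nonneg (sub_nonneg.mpr h3) (by nlinarith : (0:Int) ≤ 2 * m + 2 - pvOnes (m + 1) b - pvOnes m b)]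

theorem pvS_nonneg (m : Int) (hm : 1 ≤ m) : 0 ≤ pvS m :=
  Finset.sum_nonneg fun b _ => pvTerm_nonneg m (by omega) b

theorem pvT_nonneg (m : Int) (hm : 1 ≤ m) : 0 ≤ pvT m :=
  Int.ediv_nonneg (by nlinarith) (by norm_num)

theorem pvS_mono (m : Int) (hm : 1 ≤ m) : pvS m ≤ pvS (m + 1) := by
  unfold pvS
  calc ∑ b ∈ Finset.range (PySem.Int.bitLength (m - 1)), pvTerm m b
      ≤ ∑ b ∈ Finset.range (PySem.Int.bitLength (m - 1)), pvTerm (m + 1) b :=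
        Finset.sum_le_sum fun b _ => pvTerm_mono m hm b
    _ ≤ ∑ b ∈ Finset.range (PySem.Int.bitLength (m + 1 - 1)), pvTerm (m + 1) b := by
        apply Finset.sum_le_sum_of_subset_of_nonneg
        · have hbl := pvBitLength_mono (m - 1) (m + 1 - 1) (by omega) (by omega)
          intro x hx
          simp only [Finset.mem_range] at hx ⊢
          omega
        · exact fun b _ _ => pvTerm_nonneg (m + 1) (by omega) b

theorem pvT_mono (m : Int) (hm : 1 ≤ m) : pvT m ≤ pvT (m + 1) := by
  unfold pvT
  have h : (m + 1) * (m + 1 - 1) = m * (m - 1) + 2 * m := by ring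
  rw [h, Int.add_mul_ediv_left (m * (m - 1)) m (by norm_num : (2:Int) ≠ 0)]
  omega

theorem pvCost_mono (a b : Int) (ha : 1 ≤ a) (hab : a ≤ b) : pvCostB a ≤ pvCostB b := by
  induction b, hab using Int.le_induction with
  | base => exact le_refl _
  | succ n hn ih =>
    refine le_trans ih ?_
    rw [pvCostB_eq n (by omega), pvCostB_eq (n + 1) (by omega)]
    exact mul_le_mul (pvS_mono n (by omega)) (pvT_mono n (by omega)) (pvT_nonneg n (by omega))
      (pvS_nonneg (n + 1) (by omega))

theorem pvBsLoopA_main (s : Int) :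
    ∀ (n : Nat) (l r : Int), (r + 1 - l).toNat = n → 1 ≤ l → l ≤ r + 1 → r ≤ 10000000000000000 →
      (∀ m, 1 ≤ m → m < l → pvCostB m ≤ s) →
      (∀ m, r < m → m ≤ 10000000000000000 → ¬ pvCostB m ≤ s) →
      (∀ m, 1 ≤ m → m ≤ pvBsLoopA s l r → pvCostB m ≤ s) ∧
      (∀ m, pvBsLoopA s l r < m → m ≤ 10000000000000000 → ¬ pvCostB m ≤ s) ∧
      0 ≤ pvBsLoopA s l r ∧ pvBsLoopA s l r ≤ 10000000000000000 := by
  intro n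
  induction n using Nat.strong_induction_on with
  | _ n ih =>
    intro l r hn h1 h2 h3 hlow hhigh
    rw [pvBsLoopA]
    by_cases hlr : l ≤ r
    · rw [dif_pos hlr]
      have hb := PySem.Int.floordiv_two_mid_bounds hlr
      set mid := PySem.Int.floordiv (l + r) 2 with hmid
      have hm1 : (1:Int) ≤ mid := by omega
      by_cases hchk : pvCheckA s mid
      · rw [if_pos hchk]
        have hcost : pvCostB mid ≤ s := (pvCheckA_iff s mid hm1).mp hchk
        exact ih (r + 1 - (mid + 1)).toNat (by omega) (mid + 1) r rfl (by omega) (by omega) h3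
          (fun m hm hlt => by
            by_cases hml : m < l
            · exact hlow m hm hml
            · exact le_trans (pvCost_mono m mid hm (by omega)) hcost)
          hhigh
      · rw [if_neg hchk]
        have hcost : ¬ pvCostB mid ≤ s := fun h => hchk ((pvCheckA_iff s mid hm1).mpr h)
        exact ih (mid - 1 + 1 - l).toNat (by omega) l (mid - 1) rfl h1 (by omega) (by omega)
          hlow
          (fun m hm hmle => by
            by_cases hmr : r < m
            · exact hhigh m hmr hmle
            · exact fun hle => hcost (le_trans (pvCost_mono mid m hm1 (by omega)) hle))
    · rw [dif_neg hlr]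
      have hrl : r = l - 1 := by omega
      exact ⟨fun m hm hmr => hlow m hm (by omega),
        fun m hmr hcap => hhigh m hmr hcap, by omega, by omega⟩

theorem pvScanLoopB_main (s : Int) :
    ∀ (n : Nat) (ans mid : Int), (10000000000000000 + 1 - mid).toNat = n →
      1 ≤ mid → mid ≤ 10000000000000001 → ans = mid - 1 →
      (∀ m, 1 ≤ m → m ≤ ans → pvCostB m ≤ s) →
      (∀ m, 1 ≤ m → m ≤ pvScanLoopB s ans mid → pvCostB m ≤ s) ∧
      (pvScanLoopB s ans mid = 10000000000000000 ∨ ¬ pvCostB (pvScanLoopB s ans mid + 1) ≤ s) ∧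
      0 ≤ pvScanLoopB s ans mid ∧ pvScanLoopB s ans mid ≤ 10000000000000000 := by
  intro n
  induction n using Nat.strong_induction_on with
  | _ n ih =>
    intro ans mid hn h1 h2 hans hlow
    rw [pvScanLoopB]
    by_cases hc : mid ≤ 10000000000000000 ∧ pvCostB mid ≤ s
    · rw [dif_pos hc]
      exact ih (10000000000000000 + 1 - (mid + 1)).toNat (by omega) mid (mid + 1) rfl
        (by omega) (by omega) (by omega)
        (fun m hm hmle => by
          by_cases hm' : m ≤ ans
          · exact hlow m hm hm'
          · have : m = mid := by omega
            rw [this]; exact hc.2)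
    · rw [dif_neg hc]
      by_cases hcap : mid ≤ 10000000000000000
      · have hnc : ¬ pvCostB mid ≤ s := fun h => hc ⟨hcap, h⟩
        exact ⟨hlow, Or.inr (by rw [hans, sub_add_cancel]; exact hnc), by omega, by omega⟩
      · exact ⟨hlow, Or.inl (by omega), by omega, by omega⟩

-- ===== VERDICT (by name: the statement is the Claim_ definition above) =====
theorem maxSizedArray_spec : Claim_equal_maxSizedArray := by
  intro s _
  show maxSizedArray s = maxSizedArray_alt s
  obtain ⟨alow, ahigh, apos, acap⟩ :=
    pvBsLoopA_main s _ 1 10000000000000000 rfl (by omega) (by omega) (by omega)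
      (by omega) (by omega)
  obtain ⟨blow, bexit, bpos, bcap⟩ :=
    pvScanLoopB_main s _ 0 1 rfl (by omega) (by omega) (by omega) (by omega)
  show pvBsLoopA s 1 10000000000000000 = pvScanLoopB s 0 1
  set v := pvBsLoopA s 1 10000000000000000 with hv
  set w := pvScanLoopB s 0 1 with hw
  by_contra hne
  rcases lt_or_gt_of_ne hne with hlt | hgt
  · exact ahigh (v + 1) (by omega) (by omega) (blow (v + 1) (by omega) (by omega))
  · rcases bexit with hcap | hnp
    · omega
    · exact hnp (alow (w + 1) (by omega) (by omega))
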